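-- pv_equiv track=rewrite | github.com/gzengm/riichi-mahjong | 听牌形及向听形统计/一色听牌形及向听形/舍牌听牌形及向听形/ptn.py | toitsuptn
-- ===== SOURCE A (Python) =====
-- def multi(a, b):
-- 	ret = []
-- 	for i in a:
-- 		for j in b:
-- 			ret.append(i + j)
-- 	return ret
--
-- def toitsuptn(n_toitsu, a):
-- 	ret = []
-- 	if n_toitsu >= 1:
-- 		for i in a:
-- 			t = a.copy()
-- 			if t[i] < 2:
-- 				t[i] += 2
-- 				ret.extend(multi([[i] * 2], toitsuptn(n_toitsu - 1, t)))
-- 	else: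
-- 		return [[]]
-- 	return ret
-- ===== SOURCE B (Python) =====
-- def toitsuptn(n_toitsu, a):
--     results = []
--     stack = [(n_toitsu, a, [])]
--     while stack:
--         n, d, prefix = stack.pop()
--         if n < 1:
--             results.append(prefix)
--         else:
--             for i in reversed(list(d)):
--                 if d[i] < 2:
--                     t = dict(d)
--                     t[i] = d[i] + 2
--                     stack.append((n - 1, t, prefix + [i, i]))
--     return results
-- ===== Notes on version B (the rewrite author's own statement) =====
-- stated objective: alternative
-- what changed: Replaces A's top-down recursion (recursive call per pair placement, results concatenated via multi) by an iterative explicit-stack DFS over (remaining-pairs, counts-dict, prefix) states, pushing children in reversed key order so A's pre-order output is reproduced exactly.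
import Mathlib
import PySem

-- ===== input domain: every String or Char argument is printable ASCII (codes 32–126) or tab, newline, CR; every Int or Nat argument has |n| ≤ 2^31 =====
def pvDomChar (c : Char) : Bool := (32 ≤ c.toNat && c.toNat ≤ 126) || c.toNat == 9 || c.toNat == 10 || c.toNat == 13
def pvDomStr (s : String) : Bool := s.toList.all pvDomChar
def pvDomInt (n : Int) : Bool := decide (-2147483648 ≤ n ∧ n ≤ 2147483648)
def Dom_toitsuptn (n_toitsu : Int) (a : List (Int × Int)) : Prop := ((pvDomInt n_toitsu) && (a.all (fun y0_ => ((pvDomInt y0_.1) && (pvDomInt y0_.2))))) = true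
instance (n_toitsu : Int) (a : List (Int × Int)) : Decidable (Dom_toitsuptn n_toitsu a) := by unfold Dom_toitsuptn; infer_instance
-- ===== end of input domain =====

-- B replaces A's top-down recursion by an iterative explicit-stack (worklist) DFS that
-- carries (fuel, dict, prefix) states and appends finished prefixes; same cost, different decomposition.

-- ===== PORT A =====
-- helper 'multi(a, b)': nested loop appending i + j
def multiP (a b : List (List Int)) : List (List Int) :=
  a.foldl (fun ret i => b.foldl (fun ret j => ret ++ [i ++ j]) ret) []

-- recursion on n_toitsu, as fuel n_toitsu.toNat (base case exactly when n_toitsu < 1).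
-- 't[i]' never raises: i is drawn from the dict's keys, so getD's default is unreachable.
def toitsuptnAux : Nat → PySem.Dict Int Int → List (List Int)
  | 0, _ => [[]]
  | m + 1, a =>
    a.keys.foldl (fun ret i =>
      let t := a
      if t.getD i 0 < 2 then
        ret ++ multiP [[i, i]] (toitsuptnAux m (t.insert i (t.getD i 0 + 2)))
      else ret) []

def toitsuptn (n_toitsu : Int) (a : List (Int × Int)) : List (List Int) :=
  toitsuptnAux n_toitsu.toNat (PySem.Dict.ofList a)

-- ===== PORT B =====
-- stack entries (fuel, dict, prefix); fuel is the remaining count (n - 1 at each push, base when n < 1)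
def pvMeasure (st : List (Nat × PySem.Dict Int Int × List Int)) : Nat :=
  (st.map (fun s => (s.2.1.size + 1) ^ s.1)).sum

lemma pvMeasure_foldl_le (d : PySem.Dict Int Int) (m : Nat) (q : Int → List Int)
    (l : List Int) (hl : ∀ i ∈ l, i ∈ d.keys)
    (st : List (Nat × PySem.Dict Int Int × List Int)) :
    pvMeasure (l.foldl (fun st i =>
      if d.getD i 0 < 2 then (m, d.insert i (d.getD i 0 + 2), q i) :: st else st) st)
      ≤ pvMeasure st + l.length * (d.size + 1) ^ m := by
  induction l generalizing st with
  | nil => simp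
  | cons i l ih =>
    have hik : i ∈ d.keys := hl i (by simp)
    have hsz : (d.insert i (d.getD i 0 + 2)).size = d.size := by
      rw [PySem.Dict.size_insert]
      simp [(PySem.Dict.contains_iff_mem_keys d i).mpr hik]
    simp only [List.foldl_cons]
    by_cases h : d.getD i 0 < 2
    · simp only [h, if_true]
      have h1 : pvMeasure ((m, d.insert i (d.getD i 0 + 2), q i) :: st)
          = pvMeasure st + (d.size + 1) ^ m := by
        simp [pvMeasure, hsz]; ring
      have h2 := ih (fun j hj => hl j (by simp [hj]))
          ((m, d.insert i (d.getD i 0 + 2), q i) :: st)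
      rw [h1] at h2
      calc _ ≤ pvMeasure st + (d.size + 1) ^ m + l.length * (d.size + 1) ^ m := h2
        _ ≤ _ := by simp only [List.length_cons]; ring_nf; omega
    · simp only [h, if_false]
      have h2 := ih (fun j hj => hl j (by simp [hj])) st
      calc _ ≤ pvMeasure st + l.length * (d.size + 1) ^ m := h2
        _ ≤ _ := by
            have hpow : (0:Nat) < (d.size + 1) ^ m := pow_pos (by omega) m
            simp only [List.length_cons]; nlinarith

lemma pvMeasure_push_lt (d : PySem.Dict Int Int) (m : Nat) (p : List Int)
    (rest : List (Nat × PySem.Dict Int Int × List Int)) :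
    pvMeasure (d.keys.reverse.foldl (fun st i =>
      if d.getD i 0 < 2 then (m, d.insert i (d.getD i 0 + 2), p ++ [i, i]) :: st else st) rest)
      < pvMeasure ((m + 1, d, p) :: rest) := by
  have hk : d.keys.length = d.size := by simp [PySem.Dict.keys, PySem.Dict.size]
  have h1 := pvMeasure_foldl_le d m (fun i => p ++ [i, i]) d.keys.reverse
      (fun i hi => by simpa using (List.mem_reverse).mp hi) rest
  have hpow : (0:Nat) < (d.size + 1) ^ m := pow_pos (by omega) m
  have h2 : d.size * (d.size + 1) ^ m < (d.size + 1) ^ (m + 1) := by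
    rw [pow_succ]; nlinarith
  calc pvMeasure _ ≤ pvMeasure rest + d.keys.reverse.length * (d.size + 1) ^ m := h1
    _ = pvMeasure rest + d.size * (d.size + 1) ^ m := by rw [List.length_reverse, hk]
    _ < pvMeasure rest + (d.size + 1) ^ (m + 1) := by omega
    _ = pvMeasure ((m + 1, d, p) :: rest) := by simp [pvMeasure]; ring

-- the while-loop: pop a state; fuel 0 ⇒ emit the prefix; else push guarded children in
-- reversed key order (so the first key ends on top, preserving A's pre-order output)
def toitsuptnLoop : List (Nat × PySem.Dict Int Int × List Int) → List (List Int) → List (List Int)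
  | [], results => results
  | (0, _, pfx) :: rest, results => toitsuptnLoop rest (results ++ [pfx])
  | (m + 1, d, pfx) :: rest, results =>
      toitsuptnLoop
        (d.keys.reverse.foldl (fun st i =>
          if d.getD i 0 < 2 then (m, d.insert i (d.getD i 0 + 2), pfx ++ [i, i]) :: st else st) rest)
        results
  termination_by st _ => pvMeasure st
  decreasing_by
    · simp [pvMeasure]
    · exact pvMeasure_push_lt d m pfx rest

def toitsuptn_alt (n_toitsu : Int) (a : List (Int × Int)) : List (List Int) :=
  toitsuptnLoop [(n_toitsu.toNat, PySem.Dict.ofList a, [])] []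

-- ===== PRECONDITION & SPEC =====
def Spec_toitsuptn (n_toitsu : Int) (a : List (Int × Int)) (out : List (List Int)) : Prop := out = toitsuptn_alt n_toitsu a
instance (n_toitsu : Int) (a : List (Int × Int)) (out : List (List Int)) : Decidable (Spec_toitsuptn n_toitsu a out) := by unfold Spec_toitsuptn; infer_instance

-- ===== CLAIM (what is proved, stated in full; the proofs are below) =====
def Claim_equal_toitsuptn : Prop := ∀ (n_toitsu : Int) (a : List (Int × Int)), Dom_toitsuptn n_toitsu a → Spec_toitsuptn n_toitsu a (toitsuptn n_toitsu a)

-- ===== LEMMAS AND PROOFS =====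
lemma multiP_singleton (xs : List Int) (b : List (List Int)) :
    multiP [xs] b = b.map (fun j => xs ++ j) := by
  simp only [multiP, List.foldl_cons, List.foldl_nil]
  rw [PySem.List.foldl_append_singleton_eq_map]
  simp

lemma foldl_cons_if {α β : Type} (c : α → Prop) [DecidablePred c] (h : α → β)
    (l : List α) (st : List β) :
    l.foldl (fun st i => if c i then h i :: st else st) st
      = ((l.filter (fun i => decide (c i))).map h).reverse ++ st := by
  induction l generalizing st with
  | nil => simp
  | cons i l ih =>
    by_cases hc : c i <;> simp [hc, ih]

lemma flatMap_if {α β : Type} (c : α → Prop) [DecidablePred c] (g : α → List β)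
    (l : List α) :
    l.flatMap (fun i => if c i then g i else [])
      = (l.filter (fun i => decide (c i))).flatMap g := by
  induction l with
  | nil => simp
  | cons i l ih => by_cases hc : c i <;>
      simp [List.flatMap_cons, List.filter_cons, hc, ih]

lemma aux_succ (m : Nat) (d : PySem.Dict Int Int) :
    toitsuptnAux (m + 1) d
      = (d.keys.filter (fun i => decide (d.getD i 0 < 2))).flatMap
          (fun i => (toitsuptnAux m (d.insert i (d.getD i 0 + 2))).map (fun j => [i, i] ++ j)) := by
  have : toitsuptnAux (m + 1) d
      = d.keys.foldl (fun ret i =>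
          ret ++ (if d.getD i 0 < 2 then
            (toitsuptnAux m (d.insert i (d.getD i 0 + 2))).map (fun j => [i, i] ++ j) else [])) [] := by
    simp only [toitsuptnAux, multiP_singleton]
    congr 1
    funext ret i
    by_cases h : d.getD i 0 < 2 <;> simp [h]
  rw [this, PySem.List.foldl_append_eq_flatMap, List.nil_append,
    flatMap_if (fun i => d.getD i 0 < 2)]

lemma loop_spec (st : List (Nat × PySem.Dict Int Int × List Int)) (res : List (List Int)) :
    toitsuptnLoop st res
      = res ++ (st.map (fun s => (toitsuptnAux s.1 s.2.1).map (fun j => s.2.2 ++ j))).flatten := by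
  fun_induction toitsuptnLoop st res with
  | case1 res => simp
  | case2 d pfx rest res ih =>
      simp [ih, toitsuptnAux]
  | case3 m d pfx rest res ih =>
      refine ih.trans ?_
      simp only [dite_eq_ite]
      rw [foldl_cons_if (fun i => d.getD i 0 < 2)]
      rw [List.filter_reverse, List.map_reverse, List.reverse_reverse]
      simp only [List.map_cons, List.flatten_cons, List.map_append, List.flatten_append,
        Nat.succ_eq_add_one, List.map_map]
      rw [aux_succ]
      simp only [List.map_flatMap, List.map_map]
      rw [← List.append_assoc, ← List.append_assoc]
      congr 1
      congr 1
      induction (d.keys.filter (fun i => decide (d.getD i 0 < 2))) with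
      | nil => simp
      | cons i l ihl =>
          simp only [List.map_cons, List.flatten_cons, List.flatMap_cons, ihl]
          congr 1
          simp [Function.comp_def, List.append_assoc]

-- ===== VERDICT (by name: the statement is the Claim_ definition above) =====
theorem toitsuptn_spec : Claim_equal_toitsuptn := by
  intro n a _
  unfold Spec_toitsuptn toitsuptn toitsuptn_alt
  rw [loop_spec]
  simp
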